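-- pv_equiv track=rewrite | github.com/hogan-tech/leetcode-solution | 3894-maximize-ysum-by-picking-a-triplet-of-distinct-xvalues/3894-maximize-ysum-by-picking-a-triplet-of-distinct-xvalues.py | maxSumDistinctTriplet
-- ===== SOURCE A (Python) =====
-- from typing import List
--
-- def maxSumDistinctTriplet(x: List[int], y: List[int]) -> int:
--     maxForVal = {}
--     for xi, yi in zip(x, y):
--         if xi not in maxForVal or yi > maxForVal[xi]:
--             maxForVal[xi] = yi
--
--     if len(maxForVal) < 3:
--         return -1
--
--     topThree = sorted(maxForVal.values(), reverse=True)[:3]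
--     return sum(topThree)
-- ===== SOURCE B (Python) =====
-- def maxSumDistinctTriplet(x, y):
--     pairs = list(zip(x, y))
--     xs = []                       # distinct x-values, first-occurrence order
--     for xi, _ in pairs:
--         if xi not in xs:
--             xs.append(xi)
--     if len(xs) < 3:
--         return -1
--     best = sorted((max(yi for xj, yi in pairs if xj == v) for v in xs), reverse=True)
--     return best[0] + best[1] + best[2]
-- ===== Notes on version B (the rewrite author's own statement) =====
-- stated objective: alternative
-- what changed: B drops the running-max dict entirely: it dedups the x-values into an ordered list, then computes each per-x maximum with a separate scan over the zipped pairs, sorts those maxima descending and adds the first three by index.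
import Mathlib
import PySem

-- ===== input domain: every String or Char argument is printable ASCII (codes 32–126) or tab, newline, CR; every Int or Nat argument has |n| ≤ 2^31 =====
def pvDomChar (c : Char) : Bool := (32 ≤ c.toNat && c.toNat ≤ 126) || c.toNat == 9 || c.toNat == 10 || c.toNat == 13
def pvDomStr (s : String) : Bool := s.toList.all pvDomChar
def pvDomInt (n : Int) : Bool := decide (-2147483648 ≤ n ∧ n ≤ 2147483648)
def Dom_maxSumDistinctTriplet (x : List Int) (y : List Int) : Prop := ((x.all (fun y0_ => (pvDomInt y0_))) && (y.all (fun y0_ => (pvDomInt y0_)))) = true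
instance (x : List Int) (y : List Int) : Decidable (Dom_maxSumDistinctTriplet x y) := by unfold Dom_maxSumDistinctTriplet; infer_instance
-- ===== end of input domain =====

-- B replaces A's running-max dict by an ordered dedup of the x-values plus a per-x scan
-- for each maximum (alternative decomposition; not claimed faster).

-- ===== PORT A =====
-- A's loop body: if xi not in maxForVal or yi > maxForVal[xi]: maxForVal[xi] = yi
-- (the maxForVal[xi] lookup is only reached when xi is a key, so the .getD 0 total form is exact)
def pvStepA (d : PySem.Dict Int Int) (p : Int × Int) : PySem.Dict Int Int :=
  if (!d.contains p.1) || decide (((d.get? p.1).getD 0) < p.2) then d.insert p.1 p.2 else d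

def maxSumDistinctTriplet (x : List Int) (y : List Int) : Int :=
  let maxForVal := (List.zip x y).foldl pvStepA PySem.Dict.empty
  if maxForVal.size < 3 then (-1 : Int)
  else (PySem.List.slice (PySem.List.sorted maxForVal.values (fun v => v) true) none (some 3)).sum

-- ===== PORT B =====
-- max(yi for xj, yi in pairs if xj == v); the .getD 0 is unreachable in B: v is drawn
-- from the pairs' first components, so the filtered list is never empty.
def pvMaxMatch (pairs : List (Int × Int)) (v : Int) : Int :=
  (PySem.List.max? ((pairs.filter (fun p => p.1 == v)).map (fun p => p.2)) (fun z => z)).getD 0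

def maxSumDistinctTriplet_alt (x : List Int) (y : List Int) : Int :=
  let pairs := List.zip x y
  let xs := pairs.foldl (fun s p => if s.contains p.1 then s else s ++ [p.1]) ([] : List Int)
  if xs.length < 3 then -1
  else
    let best := PySem.List.sorted (xs.map (fun v => pvMaxMatch pairs v)) (fun v => v) true
    -- best[0] + best[1] + best[2]; the .getD 0 is unreachable (len(best) = len(xs) ≥ 3)
    ((PySem.List.pyGet? best 0).getD 0) + ((PySem.List.pyGet? best 1).getD 0)
      + ((PySem.List.pyGet? best 2).getD 0)

-- ===== PRECONDITION & SPEC =====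
def Spec_maxSumDistinctTriplet (x : List Int) (y : List Int) (out : Int) : Prop := out = maxSumDistinctTriplet_alt x y
instance (x : List Int) (y : List Int) (out : Int) : Decidable (Spec_maxSumDistinctTriplet x y out) := by unfold Spec_maxSumDistinctTriplet; infer_instance

-- ===== CLAIM (what is proved, stated in full; the proofs are below) =====
def Claim_equal_maxSumDistinctTriplet : Prop := ∀ (x : List Int) (y : List Int), Dom_maxSumDistinctTriplet x y → Spec_maxSumDistinctTriplet x y (maxSumDistinctTriplet x y)

-- ===== LEMMAS AND PROOFS =====

-- the y-values of the pairs in l whose x-value is v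
def pvMaxes (l : List (Int × Int)) (v : Int) : List Int :=
  (l.filter (fun p => p.1 == v)).map (fun p => p.2)

theorem keys_pvStepA (d : PySem.Dict Int Int) (p : Int × Int) :
    (pvStepA d p).keys = PySem.Set.add d.keys p.1 := by
  unfold pvStepA
  by_cases hc : d.contains p.1
  · have hmem : p.1 ∈ d.keys := (PySem.Dict.contains_iff_mem_keys d p.1).1 hc
    have hadd : PySem.Set.add d.keys p.1 = d.keys := by
      simp [PySem.Set.add, PySem.Set.contains, hmem]
    rw [hadd]
    split
    · exact PySem.Dict.keys_insert_of_contains d _ hc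
    · rfl
  · have hcf : d.contains p.1 = false := by simpa using hc
    have hmem : p.1 ∉ d.keys := fun h => hc ((PySem.Dict.contains_iff_mem_keys d p.1).2 h)
    rw [if_pos (by simp [hcf])]
    rw [PySem.Dict.keys_insert_of_not_contains d _ hcf]
    simp [PySem.Set.add, PySem.Set.contains, hmem]

theorem keys_foldA : ∀ (l : List (Int × Int)) (d : PySem.Dict Int Int),
    (l.foldl pvStepA d).keys = (l.map (fun p => p.1)).foldl PySem.Set.add d.keys := by
  intro l
  induction l with
  | nil => intro d; rfl
  | cons p l ih => intro d; simp only [List.foldl_cons, List.map_cons, ih, keys_pvStepA]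

-- A's dict holds the running maximum: folding the loop body over l extends an existing
-- entry w at key v to the max of w and all matching y-values of l
theorem get?_foldA_some : ∀ (l : List (Int × Int)) (d : PySem.Dict Int Int) (v w : Int),
    d.get? v = some w →
    (l.foldl pvStepA d).get? v = some ((pvMaxes l v).foldl max w) := by
  intro l
  induction l with
  | nil => intro d v w h; simpa [pvMaxes] using h
  | cons p l ih =>
    intro d v w h
    by_cases hv : p.1 = v
    · subst hv
      have hc : d.contains p.1 = true := by
        rw [PySem.Dict.contains_eq_isSome_get?, h]; rfl
      have hmx : pvMaxes (p :: l) p.1 = p.2 :: pvMaxes l p.1 := by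
        simp [pvMaxes]
      rw [List.foldl_cons]
      by_cases hlt : ((d.get? p.1).getD 0) < p.2
      · have hstep : pvStepA d p = d.insert p.1 p.2 := by
          unfold pvStepA; rw [if_pos (by simp [hlt])]
        rw [hstep, ih _ _ p.2 (PySem.Dict.get?_insert_self d p.1 p.2), hmx]
        have : max w p.2 = p.2 := by
          rw [h] at hlt; simp at hlt; exact max_eq_right (le_of_lt hlt)
        simp [List.foldl_cons, this]
      · have hstep : pvStepA d p = d := by
          unfold pvStepA; rw [if_neg (by simp [hc, hlt])]
        rw [hstep, ih _ _ w h, hmx]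
        have : max w p.2 = w := by
          rw [h] at hlt; simp at hlt; exact max_eq_left hlt
        simp [List.foldl_cons, this]
    · have hmx : pvMaxes (p :: l) v = pvMaxes l v := by
        simp [pvMaxes, hv]
      have hget : (pvStepA d p).get? v = d.get? v := by
        unfold pvStepA
        split
        · exact PySem.Dict.get?_insert_of_ne d _ (fun hh => hv hh.symm)
        · rfl
      rw [List.foldl_cons, hmx, ih _ _ w (hget.trans h)]

-- starting from a dict without key v, the entry at v ends up as the maximum of the matching y-values
theorem get?_foldA_none : ∀ (l : List (Int × Int)) (d : PySem.Dict Int Int) (v : Int),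
    d.get? v = none →
    (l.foldl pvStepA d).get? v =
      (match pvMaxes l v with
       | [] => none
       | a :: t => some (t.foldl max a)) := by
  intro l
  induction l with
  | nil => intro d v h; simpa [pvMaxes] using h
  | cons p l ih =>
    intro d v h
    by_cases hv : p.1 = v
    · subst hv
      have hc : d.contains p.1 = false := by
        rw [PySem.Dict.contains_eq_isSome_get?, h]; rfl
      have hstep : pvStepA d p = d.insert p.1 p.2 := by
        unfold pvStepA; rw [if_pos (by simp [hc])]
      have hmx : pvMaxes (p :: l) p.1 = p.2 :: pvMaxes l p.1 := by
        simp [pvMaxes]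
      rw [List.foldl_cons, hstep, hmx,
        get?_foldA_some l _ _ p.2 (PySem.Dict.get?_insert_self d p.1 p.2)]
    · have hmx : pvMaxes (p :: l) v = pvMaxes l v := by
        simp [pvMaxes, hv]
      have hget : (pvStepA d p).get? v = d.get? v := by
        unfold pvStepA
        split
        · exact PySem.Dict.get?_insert_of_ne d _ (fun hh => hv hh.symm)
        · rfl
      rw [List.foldl_cons, hmx, ih _ _ (hget.trans h)]

-- B's dedup loop is the Set.add fold over the first components
theorem dedup_foldB : ∀ (l : List (Int × Int)) (s : List Int),
    l.foldl (fun s p => if s.contains p.1 then s else s ++ [p.1]) s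
      = (l.map (fun p => p.1)).foldl PySem.Set.add s := by
  intro l
  induction l with
  | nil => intro s; rfl
  | cons p l ih =>
    intro s
    have : PySem.Set.add s p.1 = if s.contains p.1 then s else s ++ [p.1] := by
      simp [PySem.Set.add, PySem.Set.contains]
    simp only [List.foldl_cons, List.map_cons, ih, this]

theorem ports_eq (x y : List Int) :
    maxSumDistinctTriplet x y = maxSumDistinctTriplet_alt x y := by
  unfold maxSumDistinctTriplet maxSumDistinctTriplet_alt
  dsimp only
  set l := List.zip x y with hl
  set d := l.foldl pvStepA PySem.Dict.empty with hd
  set xs := l.foldl (fun s p => if s.contains p.1 then s else s ++ [p.1]) ([] : List Int) with hxs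
  have hkeys : d.keys = xs := by
    rw [hd, hxs, keys_foldA, dedup_foldB]
    rfl
  have hof : xs = PySem.Set.ofList (l.map (fun p => p.1)) := by
    rw [hxs, dedup_foldB, PySem.Set.ofList_eq_foldl]
  have hnd : d.keys.Nodup := by rw [hkeys, hof]; exact PySem.Set.nodup_ofList _
  have hsz : d.size = xs.length := by
    rw [← hkeys]; simp [PySem.Dict.size, PySem.Dict.keys]
  have hpt : ∀ k ∈ d.keys, d.getD k 0 = pvMaxMatch l k := by
    intro k hk
    have hkm : k ∈ l.map (fun p => p.1) := by
      rw [hkeys, hof] at hk; exact (PySem.Set.mem_ofList _ _).1 hk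
    have hne : pvMaxes l k ≠ [] := by
      obtain ⟨p, hp, hpk⟩ := List.mem_map.1 hkm
      intro hnil
      have : p.2 ∈ pvMaxes l k := by
        unfold pvMaxes
        exact List.mem_map.2 ⟨p, List.mem_filter.2 ⟨hp, by simp [hpk]⟩, rfl⟩
      rw [hnil] at this; exact absurd this (List.not_mem_nil)
    obtain ⟨a, t, hm⟩ : ∃ a t, pvMaxes l k = a :: t := by
      cases hmm : pvMaxes l k with
      | nil => exact absurd hmm hne
      | cons a t => exact ⟨a, t, rfl⟩
    have hget : d.get? k = some (t.foldl max a) := by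
      rw [hd, get?_foldA_none l _ k (by simp [PySem.Dict.get?, PySem.Dict.empty]), hm]
    rw [PySem.Dict.getD_eq_get?_getD, hget]
    unfold pvMaxMatch
    have : (l.filter (fun p => p.1 == k)).map (fun p => p.2) = a :: t := hm
    rw [this, PySem.List.max?_id_cons]
  have hvals : d.values = xs.map (fun v => pvMaxMatch l v) := by
    rw [PySem.Dict.values_eq_map_keys d hnd 0, ← hkeys]
    exact List.map_congr_left hpt
  rw [hsz, hvals]
  rcases Nat.lt_or_ge xs.length 3 with hlen | hlen
  · rw [if_pos hlen, if_pos hlen]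
  · rw [if_neg (Nat.not_lt.2 hlen), if_neg (Nat.not_lt.2 hlen)]
    set s := PySem.List.sorted (xs.map (fun v => pvMaxMatch l v)) (fun v => v) true with hs
    have hslen : 3 ≤ s.length := by
      rw [hs, PySem.List.length_sorted, List.length_map]; omega
    obtain ⟨a, b, c, t, hcons⟩ : ∃ a b c t, s = a :: b :: c :: t := by
      match s, hslen with
      | a :: b :: c :: t, _ => exact ⟨a, b, c, t, rfl⟩
    rw [hcons, PySem.List.slice_to _ (by norm_num)]
    have h1 : ((0:Int) ≤ (t.length:Int) + 1 + 1) := by omega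
    have h2 : ((0:Int) ≤ (t.length:Int) + 1) := by omega
    have h3 : ((2:Int) ≤ (t.length:Int) + 1 + 1) := by omega
    simp [PySem.List.pyGet?, PySem.List.pyIdx?, h1, h2, h3]
    omega

-- ===== VERDICT (by name: the statement is the Claim_ definition above) =====
theorem maxSumDistinctTriplet_spec : Claim_equal_maxSumDistinctTriplet := by
  intro x y _
  unfold Spec_maxSumDistinctTriplet
  exact ports_eq x y
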